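-- pv_equiv track=rewrite | github.com/babyyu0/Programmers-BOJHub | Python3/프로그래머스/2/250136. ［PCCP 기출문제］ 2번 ／ 석유 시추/［PCCP 기출문제］ 2번 ／ 석유 시추.py | solution
-- ===== SOURCE A (Python) =====
-- from collections import deque
--
-- def solution(land):
--     answer, N, M = 0, len(land), len(land[0])
--     dr, dc = [-1, 1, 0, 0], [0, 0, -1, 1]
--     check_map = [([0] * len(land[0])) for i in range(len(land))]
--     hole_num, hole_dict = 1, dict()
--
--     def bfs(r, c, num):
--         queue = deque()
--         queue.append([r, c])
--
--         while queue:
--             r, c= queue.popleft()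
--             hole_dict[num] += 1
--             for nr, nc in zip(dr, dc):
--                 nr, nc = r + nr, c + nc
--                 if 0 <= nr and nr < N and 0 <= nc and nc < M and land[nr][nc] == 1 and check_map[nr][nc] == 0:
--                     check_map[nr][nc] = num
--                     queue.append([nr, nc])
--
--     for i in range(N):
--         for j in range(M):
--             if land[i][j] == 1 and check_map[i][j] == 0:
--                 check_map[i][j], hole_dict[hole_num] = hole_num, 0
--                 bfs(i, j, hole_num)
--                 hole_num += 1
--
--     tmp = set()
--     for i in range(M):
--         tmp = set()
--         for j in range(N):
--             if check_map[j][i] != 0: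
--                 tmp.add(check_map[j][i])
--         answer = max(answer, sum(hole_dict[t] for t in tmp))
--     return answer
-- ===== SOURCE B (Python) =====
-- def solution(land):
--     # Per-column multi-source flood fill: count every cell reachable from the
--     # column's oil cells; no component labels, no size dictionary.
--     n, m = len(land), len(land[0])
--     best = 0
--     for c in range(m):
--         seeds = [(r, c) for r in range(n) if land[r][c] == 1]
--         seen = set(seeds)
--         stack = list(seeds)
--         while stack:
--             r, cc = stack.pop()
--             for nr, nc in ((r - 1, cc), (r + 1, cc), (r, cc - 1), (r, cc + 1)):
--                 if 0 <= nr < n and 0 <= nc < m and land[nr][nc] == 1 and (nr, nc) not in seen: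
--                     seen.add((nr, nc))
--                     stack.append((nr, nc))
--         best = max(best, len(seen))
--     return best
-- ===== Notes on version B (the rewrite author's own statement) =====
-- stated objective: simpler
-- what changed: A labels every connected component with a global BFS pass, stores component sizes in a dict and, per column, sums the sizes of the distinct labels seen there; B drops labels and sizes entirely and instead runs, per column, one multi-source stack flood fill from the column's oil cells and takes the count of visited cells.
import Mathlib
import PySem

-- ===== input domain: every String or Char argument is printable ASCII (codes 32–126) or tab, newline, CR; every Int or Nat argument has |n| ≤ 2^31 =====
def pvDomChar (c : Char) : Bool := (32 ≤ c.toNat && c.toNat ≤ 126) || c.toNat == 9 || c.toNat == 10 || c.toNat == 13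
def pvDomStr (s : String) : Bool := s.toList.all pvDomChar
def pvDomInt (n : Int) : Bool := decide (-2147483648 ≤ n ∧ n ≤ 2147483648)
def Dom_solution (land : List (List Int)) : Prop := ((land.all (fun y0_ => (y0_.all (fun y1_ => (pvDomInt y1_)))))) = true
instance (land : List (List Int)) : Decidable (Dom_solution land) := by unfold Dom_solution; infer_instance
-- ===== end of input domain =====

-- B replaces A's global BFS component labeling + per-column label-set sums by a per-column
-- multi-source flood fill that simply counts the reachable cells (objective: simpler).

-- ===== PORT A =====

-- land[r][c] read; exact for Python wherever it is used: every use is guarded by 0 ≤ r/c bounds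
def pvIdx2 (g : List (List Int)) (r c : Int) : Int := (g.getD r.toNat []).getD c.toNat 0

-- check_map[r][c] = v (in-place row update, done functionally)
def pvSet2 (g : List (List Int)) (r c : Int) (v : Int) : List (List Int) :=
  g.modify r.toNat (fun row => row.set c.toNat v)

-- zip(dr, dc) of A, as the list of offsets
def pvDirs : List (Int × Int) := [(-1, 0), (1, 0), (0, -1), (0, 1)]

-- A's bfs: while queue: pop left, count, push eligible unmarked neighbours (marking them).
-- fuel is a totality guard only (Python's while has none); the proofs show it is never exhausted.
-- hole_dict[num] += 1 is ported with default 0; the key is always present when Python runs it.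
def pvBfsA (land : List (List Int)) (N M num : Int) :
    Nat → List (Int × Int) → List (List Int) → PySem.Dict Int Int →
      List (List Int) × PySem.Dict Int Int
  | 0, _, check, dict => (check, dict)
  | _ + 1, [], check, dict => (check, dict)
  | fuel + 1, (r, c) :: rest, check, dict =>
    let dict := dict.modify num 0 (· + 1)
    let st := pvDirs.foldl (fun (st : List (List Int) × List (Int × Int)) d =>
        let nr := r + d.1
        let nc := c + d.2
        if 0 ≤ nr ∧ nr < N ∧ 0 ≤ nc ∧ nc < M ∧ pvIdx2 land nr nc = 1 ∧ pvIdx2 st.1 nr nc = 0 then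
          (pvSet2 st.1 nr nc num, st.2 ++ [(nr, nc)])
        else st) (check, [])
    pvBfsA land N M num fuel (rest ++ st.2) st.1 dict

-- sum(hole_dict[t] for t in tmp): the set is consumed only by an order-independent Int sum
def solution (land : List (List Int)) : Int :=
  let N : Int := land.length
  let M : Int := (land.headD []).length
  let fuel : Nat := land.length * (land.headD []).length * 5 + 5
  let check0 : List (List Int) := List.replicate land.length (List.replicate (land.headD []).length 0)
  let st := (PySem.List.pyRange 0 N 1).foldl
    (fun (st : List (List Int) × PySem.Dict Int Int × Int) i =>
      (PySem.List.pyRange 0 M 1).foldl (fun st j =>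
        if pvIdx2 land i j = 1 ∧ pvIdx2 st.1 i j = 0 then
          let check := pvSet2 st.1 i j st.2.2
          let dict := st.2.1.insert st.2.2 0
          let r := pvBfsA land N M st.2.2 fuel [(i, j)] check dict
          (r.1, r.2, st.2.2 + 1)
        else st) st)
    (check0, PySem.Dict.empty, 1)
  (PySem.List.pyRange 0 M 1).foldl (fun answer i =>
    let tmp : PySem.Set Int := (PySem.List.pyRange 0 N 1).foldl (fun tmp j =>
        if pvIdx2 st.1 j i ≠ 0 then PySem.Set.add tmp (pvIdx2 st.1 j i) else tmp)
      PySem.Set.empty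
    max answer ((tmp.map (fun t => st.2.1.getD t 0)).sum)) 0

-- ===== PORT B =====

-- the four neighbour candidates of a cell, in B's tuple order
def pvNbrs (p : Int × Int) : List (Int × Int) :=
  [(p.1 - 1, p.2), (p.1 + 1, p.2), (p.1, p.2 - 1), (p.1, p.2 + 1)]

-- B's while loop: pop from the end of the stack, push unseen oil neighbours.
-- fuel is a totality guard only; the proofs show it is never exhausted.
def pvDfsB (land : List (List Int)) (n m : Int) :
    Nat → List (Int × Int) → PySem.Set (Int × Int) → PySem.Set (Int × Int)
  | 0, _, seen => seen
  | fuel + 1, stack, seen =>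
    match stack.getLast? with
    | none => seen
    | some w =>
      let st := (pvNbrs w).foldl
        (fun (st : PySem.Set (Int × Int) × List (Int × Int)) q =>
          if 0 ≤ q.1 ∧ q.1 < n ∧ 0 ≤ q.2 ∧ q.2 < m ∧ pvIdx2 land q.1 q.2 = 1 ∧ q ∉ st.1 then
            (PySem.Set.add st.1 q, st.2 ++ [q])
          else st) (seen, stack.dropLast)
      pvDfsB land n m fuel st.2 st.1

def solution_alt (land : List (List Int)) : Int :=
  let n : Int := land.length
  let m : Int := (land.headD []).length
  let fuel : Nat := land.length * (land.headD []).length * 5 + 5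
  (PySem.List.pyRange 0 m 1).foldl (fun best c =>
    let seeds := ((PySem.List.pyRange 0 n 1).filter (fun r => pvIdx2 land r c == 1)).map
      (fun r => (r, c))
    let seen := pvDfsB land n m fuel seeds (PySem.Set.ofList seeds)
    max best (seen.length : Int)) 0

-- ===== PRECONDITION & SPEC =====
-- Pre_ excludes exactly the inputs where A raises IndexError: the empty grid (len(land[0]))
-- and grids where some row is shorter than row 0 (land[i][j] for j < len(land[0])).
def Pre_solution (land : List (List Int)) : Prop :=
  land ≠ [] ∧ ∀ row ∈ land, (land.headD []).length ≤ row.length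
instance (land : List (List Int)) : Decidable (Pre_solution land) := by
  unfold Pre_solution; infer_instance

def pvWitness_solution : List (List Int) := [[1, 0, 1], [1, 1, 0], [0, 0, 1]]

def Spec_solution (land : List (List Int)) (out : Int) : Prop := out = solution_alt land
instance (land : List (List Int)) (out : Int) : Decidable (Spec_solution land out) := by
  unfold Spec_solution; infer_instance

-- ===== CLAIM (what is proved, stated in full; the proofs are below) =====
def Claim_equal_solution : Prop :=
  ∀ (land : List (List Int)), Dom_solution land → Pre_solution land →
    Spec_solution land (solution land)

-- ===== LEMMAS AND PROOFS =====

-- ---- basic facts about the 2-D array helpers ----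

theorem pv_getD_getElem {α : Type} [Inhabited α] (l : List α) (i : Nat) (dflt : α)
    (h : i < l.length) : l.getD i dflt = l[i]'h := by
  simp [List.getD_eq_getElem?_getD, List.getElem?_eq_getElem h]

-- ---- the abstract grid, oil predicate, adjacency and connectivity ----

def pvN (land : List (List Int)) : Int := land.length
def pvM (land : List (List Int)) : Int := (land.headD []).length

abbrev pvInGrid (land : List (List Int)) (p : Int × Int) : Prop :=
  0 ≤ p.1 ∧ p.1 < pvN land ∧ 0 ≤ p.2 ∧ p.2 < pvM land

def pvOil (land : List (List Int)) (p : Int × Int) : Prop :=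
  pvInGrid land p ∧ pvIdx2 land p.1 p.2 = 1

def pvAdj (land : List (List Int)) (p q : Int × Int) : Prop :=
  pvOil land p ∧ pvOil land q ∧ (q.1 - p.1).natAbs + (q.2 - p.2).natAbs = 1

def pvConn (land : List (List Int)) : Int × Int → Int × Int → Prop :=
  Relation.ReflTransGen (pvAdj land)

def pvReachC (land : List (List Int)) (c : Int) (q : Int × Int) : Prop :=
  ∃ r : Int, pvOil land (r, c) ∧ pvConn land (r, c) q

noncomputable def pvGridF (land : List (List Int)) : Finset (Int × Int) :=
  Finset.Ico 0 (pvN land) ×ˢ Finset.Ico 0 (pvM land)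

def pvWf (land : List (List Int)) (g : List (List Int)) : Prop :=
  g.length = land.length ∧
  ∀ i : Nat, i < g.length → (g.getD i []).length = (land.headD []).length



theorem pv_wf_set2 {land g : List (List Int)} (h : pvWf land g) (r c v : Int) :
    pvWf land (pvSet2 g r c v) := by
  obtain ⟨h1, h2⟩ := h
  refine ⟨by simpa [pvSet2] using h1, ?_⟩
  intro i hi
  simp only [pvSet2, List.length_modify] at hi
  have := h2 i hi
  simp only [pvSet2, List.getD_eq_getElem?_getD, List.getElem?_modify,
    List.getElem?_eq_getElem hi] at *
  by_cases hri : r.toNat = i <;> simp [hri] at *  <;> omega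

theorem pv_idx2_set2_self {land g : List (List Int)} {p : Int × Int}
    (hw : pvWf land g) (hp : pvInGrid land p) (v : Int) :
    pvIdx2 (pvSet2 g p.1 p.2 v) p.1 p.2 = v := by
  obtain ⟨hw1, hw2⟩ := hw
  obtain ⟨a1, a2, a3, a4⟩ := hp
  have hr : p.1.toNat < g.length := by simp only [pvN] at a2; omega
  have hc : p.2.toNat < (g.getD p.1.toNat []).length := by
    rw [hw2 p.1.toNat hr]; simp only [pvM] at a4; omega
  simp only [pvIdx2, pvSet2, List.getD_eq_getElem?_getD, List.getElem?_modify,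
    List.getElem?_eq_getElem hr]
  rw [pv_getD_getElem _ _ _ hr] at hc
  simp [List.getD_eq_getElem?_getD, List.getElem?_set, hc]

theorem pv_idx2_set2_ne {land g : List (List Int)} {p q : Int × Int}
    (hw : pvWf land g) (hq : pvInGrid land q) (hp : pvInGrid land p) (hne : p ≠ q) (v : Int) :
    pvIdx2 (pvSet2 g q.1 q.2 v) p.1 p.2 = pvIdx2 g p.1 p.2 := by
  obtain ⟨hw1, hw2⟩ := hw
  obtain ⟨a1, a2, a3, a4⟩ := hp
  obtain ⟨b1, b2, b3, b4⟩ := hq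
  have hr : p.1.toNat < g.length := by simp only [pvN] at a2; omega
  by_cases hrow : q.1.toNat = p.1.toNat
  · -- same row, so the columns differ
    have hcol : q.2.toNat ≠ p.2.toNat := by
      intro hcc
      apply hne
      have : p.1 = q.1 := by omega
      have : p.2 = q.2 := by omega
      exact Prod.ext (by omega) (by omega)
    simp only [pvIdx2, pvSet2, List.getD_eq_getElem?_getD, List.getElem?_modify,
      List.getElem?_eq_getElem hr, hrow]
    simp [hcol]
  · simp only [pvIdx2, pvSet2, List.getD_eq_getElem?_getD, List.getElem?_modify,
      List.getElem?_eq_getElem hr]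
    simp [hrow]

theorem pv_wf_check0 (land : List (List Int)) :
    pvWf land (List.replicate land.length (List.replicate (land.headD []).length 0)) := by
  refine ⟨by simp, ?_⟩
  intro i hi
  simp only [List.length_replicate] at hi
  rw [List.getD_replicate _ hi]
  simp

theorem pv_idx2_check0 (land : List (List Int)) (p : Int × Int) :
    pvIdx2 (List.replicate land.length (List.replicate (land.headD []).length 0)) p.1 p.2 = 0 := by
  simp only [pvIdx2, List.getD_eq_getElem?_getD, List.getElem?_replicate]
  by_cases h1 : p.1.toNat < land.length <;>
    by_cases h2 : p.2.toNat < (land.headD []).length <;> simp [h1, h2] <;> rfl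

-- ---- graph lemmas ----

theorem pv_mem_gridF {land : List (List Int)} {p : Int × Int} :
    p ∈ pvGridF land ↔ pvInGrid land p := by
  simp [pvGridF, Finset.mem_product, Finset.mem_Ico, pvInGrid]
  tauto

theorem pv_adj_symm {land : List (List Int)} {p q : Int × Int} (h : pvAdj land p q) :
    pvAdj land q p := by
  exact ⟨h.2.1, h.1, by have := h.2.2; omega⟩

theorem pv_conn_symm {land : List (List Int)} {p q : Int × Int} (h : pvConn land p q) :
    pvConn land q p := by
  exact Relation.ReflTransGen.symmetric (fun _ _ hh => pv_adj_symm hh) h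

theorem pv_conn_oil {land : List (List Int)} {p q : Int × Int}
    (hp : pvOil land p) (h : pvConn land p q) : pvOil land q := by
  induction h with
  | refl => exact hp
  | tail _ hadj _ => exact hadj.2.1

theorem pv_adj_mem_nbrs {land : List (List Int)} {p q : Int × Int} (h : pvAdj land p q) :
    q ∈ pvNbrs p := by
  have h2 := h.2.2
  have hcase : (q.1 = p.1 - 1 ∧ q.2 = p.2) ∨ (q.1 = p.1 + 1 ∧ q.2 = p.2) ∨
      (q.1 = p.1 ∧ q.2 = p.2 - 1) ∨ (q.1 = p.1 ∧ q.2 = p.2 + 1) := by omega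
  simp only [pvNbrs, List.mem_cons, List.not_mem_nil, or_false, Prod.ext_iff]
  tauto

theorem pv_nbrs_adj {land : List (List Int)} {p q : Int × Int}
    (hp : pvOil land p) (hq : pvOil land q) (hmem : q ∈ pvNbrs p) : pvAdj land p q := by
  refine ⟨hp, hq, ?_⟩
  simp only [pvNbrs, List.mem_cons, List.not_mem_nil, or_false, Prod.ext_iff] at hmem
  rcases hmem with ⟨h1, h2⟩ | ⟨h1, h2⟩ | ⟨h1, h2⟩ | ⟨h1, h2⟩ <;> omega

theorem pv_nbrs_nodup (p : Int × Int) : (pvNbrs p).Nodup := by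
  simp [pvNbrs, Prod.ext_iff]
  omega

theorem pv_closed_conn {land : List (List Int)} {S : Int × Int → Prop}
    (hS : ∀ v q, S v → pvAdj land v q → S q) {s q : Int × Int}
    (hs : S s) (h : pvConn land s q) : S q := by
  induction h with
  | refl => exact hs
  | tail _ hadj ih => exact hS _ _ ih hadj

-- labels that form an adjacency-closed marked region cannot meet the component of an unmarked seed
theorem pv_comp_unmarked {land check : List (List Int)} {seed p : Int × Int}
    (hclosed : ∀ v q, pvInGrid land v → pvIdx2 check v.1 v.2 ≠ 0 → pvAdj land v q →
      pvIdx2 check q.1 q.2 ≠ 0)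
    (hseed0 : pvIdx2 check seed.1 seed.2 = 0)
    (hconn : pvConn land seed p) (hp : pvOil land p) :
    pvIdx2 check p.1 p.2 = 0 := by
  by_contra hmk
  have hback : pvConn land p seed := pv_conn_symm hconn
  have : pvInGrid land seed ∧ pvIdx2 check seed.1 seed.2 ≠ 0 := by
    refine pv_closed_conn (S := fun v => pvInGrid land v ∧ pvIdx2 check v.1 v.2 ≠ 0)
      (fun v q hv hadj => ⟨hadj.2.1.1, hclosed v q hv.1 hv.2 hadj⟩) ⟨hp.1, hmk⟩ hback
  exact this.2 hseed0

-- ---- generic fold helpers ----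

theorem pv_foldl_inv {σ α : Type} (Inv : List α → σ → Prop) (f : σ → α → σ) :
    ∀ (l P : List α) (st : σ), Inv P st →
      (∀ Q x st', x ∈ l → Inv Q st' → Inv (Q ++ [x]) (f st' x)) →
      Inv (P ++ l) (l.foldl f st) := by
  intro l
  induction l with
  | nil => intro P st h _; simpa using h
  | cons x l ih =>
    intro P st h hstep
    have h1 : Inv (P ++ [x]) (f st x) := hstep P x st (by simp) h
    have h2 := ih (P ++ [x]) (f st x) h1 (fun Q y st' hy hq => hstep Q y st' (by simp [hy]) hq)
    simpa [List.append_assoc] using h2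

-- ---- the selection made by one pass over a neighbour list ----

abbrev pvElig (land check : List (List Int)) (q : Int × Int) : Prop :=
  pvInGrid land q ∧ pvIdx2 land q.1 q.2 = 1 ∧ pvIdx2 check q.1 q.2 = 0

def pvSelA (land check : List (List Int)) (ns : List (Int × Int)) : List (Int × Int) :=
  ns.filter (fun q => decide (pvElig land check q))

def pvMark (num : Int) (check : List (List Int)) (sel : List (Int × Int)) : List (List Int) :=
  sel.foldl (fun ch q => pvSet2 ch q.1 q.2 num) check

theorem pv_wf_mark {land check : List (List Int)} (num : Int) (sel : List (Int × Int))
    (hw : pvWf land check) : pvWf land (pvMark num check sel) := by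
  induction sel generalizing check with
  | nil => exact hw
  | cons q sel ih => exact ih (pv_wf_set2 hw _ _ _)

theorem pv_idx2_mark {land : List (List Int)} (num : Int) :
    ∀ (sel : List (Int × Int)) (check : List (List Int)), pvWf land check →
      (∀ q ∈ sel, pvInGrid land q) → ∀ p, pvInGrid land p →
      pvIdx2 (pvMark num check sel) p.1 p.2 = if p ∈ sel then num else pvIdx2 check p.1 p.2 := by
  intro sel
  induction sel with
  | nil => intro check _ _ p _; simp [pvMark]
  | cons q sel ih =>
    intro check hw hgrid p hp
    have hq : pvInGrid land q := hgrid q (by simp)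
    have step : pvMark num check (q :: sel) = pvMark num (pvSet2 check q.1 q.2 num) sel := rfl
    rw [step, ih _ (pv_wf_set2 hw _ _ _) (fun x hx => hgrid x (by simp [hx])) p hp]
    by_cases hmem : p ∈ sel
    · simp [hmem]
    · by_cases hpq : p = q
      · subst hpq
        simp [hmem, pv_idx2_set2_self hw hp num]
      · simp [hmem, hpq, pv_idx2_set2_ne hw hq hp hpq num]

theorem pv_innerA (land : List (List Int)) (num : Int) (hnum : 1 ≤ num) :
    ∀ (ns : List (Int × Int)), ns.Nodup → ∀ (check : List (List Int)) (acc : List (Int × Int)),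
      pvWf land check →
      ns.foldl (fun (st : List (List Int) × List (Int × Int)) q =>
          if 0 ≤ q.1 ∧ q.1 < pvN land ∧ 0 ≤ q.2 ∧ q.2 < pvM land ∧
              pvIdx2 land q.1 q.2 = 1 ∧ pvIdx2 st.1 q.1 q.2 = 0 then
            (pvSet2 st.1 q.1 q.2 num, st.2 ++ [q])
          else st) (check, acc)
        = (pvMark num check (pvSelA land check ns), acc ++ pvSelA land check ns) := by
  intro ns
  induction ns with
  | nil => intro _ check acc _; simp [pvSelA, pvMark]
  | cons q ns ih =>
    intro hnd check acc hw
    have hnd' : ns.Nodup := hnd.of_cons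
    have hqns : q ∉ ns := by simp at hnd; exact hnd.1
    have hiff : (0 ≤ q.1 ∧ q.1 < pvN land ∧ 0 ≤ q.2 ∧ q.2 < pvM land ∧
        pvIdx2 land q.1 q.2 = 1 ∧ pvIdx2 check q.1 q.2 = 0) ↔ pvElig land check q := by
      unfold pvElig pvInGrid
      tauto
    simp only [List.foldl_cons]
    by_cases hcond : pvElig land check q
    · rw [if_pos (hiff.mpr hcond)]
      have hqg : pvInGrid land q := hcond.1
      have hw' : pvWf land (pvSet2 check q.1 q.2 num) := pv_wf_set2 hw _ _ _
      rw [ih hnd' _ _ hw']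
      have hsel : pvSelA land (pvSet2 check q.1 q.2 num) ns = pvSelA land check ns := by
        apply List.filter_congr
        intro x hx
        have hxq : x ≠ q := fun he => hqns (he ▸ hx)
        by_cases hxg : pvInGrid land x
        · simp only [decide_eq_decide]
          unfold pvElig
          rw [pv_idx2_set2_ne hw hqg hxg hxq]
        · simp only [decide_eq_decide]
          unfold pvElig
          tauto
      have hselcons : pvSelA land check (q :: ns) = q :: pvSelA land check ns := by
        simp [pvSelA, List.filter_cons, hcond]
      rw [hsel, hselcons]
      simp [pvMark, List.foldl_cons, List.append_assoc]
    · rw [if_neg (fun hc => hcond (hiff.mp hc))]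
      rw [ih hnd' _ _ hw]
      have hselcons : pvSelA land check (q :: ns) = pvSelA land check ns := by
        simp [pvSelA, List.filter_cons, hcond]
      rw [hselcons]

theorem pv_selA_sub (land check : List (List Int)) (ns : List (Int × Int)) :
    ∀ q ∈ pvSelA land check ns, pvElig land check q ∧ q ∈ ns := by
  intro q hq
  simp only [pvSelA, List.mem_filter, decide_eq_true_eq] at hq
  exact ⟨hq.2, hq.1⟩

-- ---- the BFS of A ----

noncomputable def pvVf (land check : List (List Int)) (num : Int) : Finset (Int × Int) :=
  (pvGridF land).filter (fun q => pvIdx2 check q.1 q.2 = num)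

noncomputable def pvUf (land check : List (List Int)) : Finset (Int × Int) :=
  (pvGridF land).filter (fun q => pvIdx2 land q.1 q.2 = 1 ∧ pvIdx2 check q.1 q.2 = 0)

def pvBfsCtx (land : List (List Int)) (seed : Int × Int) (num : Int)
    (check₀ : List (List Int)) : Prop :=
  pvWf land check₀ ∧ 1 ≤ num ∧ pvOil land seed ∧ pvIdx2 check₀ seed.1 seed.2 = 0 ∧
  (∀ p, pvInGrid land p → pvIdx2 check₀ p.1 p.2 ≠ num) ∧
  (∀ v q, pvInGrid land v → pvIdx2 check₀ v.1 v.2 ≠ 0 → pvAdj land v q →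
    pvIdx2 check₀ q.1 q.2 ≠ 0)

def pvBfsInv (land : List (List Int)) (seed : Int × Int) (num : Int)
    (check₀ : List (List Int)) (dict₀ : PySem.Dict Int Int)
    (W : List (Int × Int)) (check : List (List Int)) (dict : PySem.Dict Int Int) : Prop :=
  pvWf land check ∧
  (∀ p, pvInGrid land p → pvIdx2 check p.1 p.2 ≠ num → pvIdx2 check p.1 p.2 = pvIdx2 check₀ p.1 p.2) ∧
  (∀ p, pvInGrid land p → pvIdx2 check p.1 p.2 = num → pvOil land p ∧ pvConn land seed p) ∧
  pvIdx2 check seed.1 seed.2 = num ∧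
  W.Nodup ∧ (∀ w ∈ W, pvInGrid land w ∧ pvIdx2 check w.1 w.2 = num) ∧
  (∀ v, pvInGrid land v → pvIdx2 check v.1 v.2 = num → v ∉ W →
    ∀ q, pvAdj land v q → pvIdx2 check q.1 q.2 ≠ 0) ∧
  dict.getD num 0 = ((pvVf land check num).card : Int) - W.length ∧
  (∀ k, k ≠ num → dict.getD k 0 = dict₀.getD k 0)

def pvBfsPost (land : List (List Int)) (seed : Int × Int) (num : Int)
    (check₀ : List (List Int)) (dict₀ : PySem.Dict Int Int)
    (res : List (List Int) × PySem.Dict Int Int) : Prop :=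
  pvWf land res.1 ∧
  (∀ p, pvInGrid land p → pvOil land p → pvConn land seed p → pvIdx2 res.1 p.1 p.2 = num) ∧
  (∀ p, pvInGrid land p → ¬ (pvOil land p ∧ pvConn land seed p) →
    pvIdx2 res.1 p.1 p.2 = pvIdx2 check₀ p.1 p.2) ∧
  res.2.getD num 0 = ((pvVf land res.1 num).card : Int) ∧
  (∀ k, k ≠ num → res.2.getD k 0 = dict₀.getD k 0)

theorem pv_dirs_map (r c : Int) :
    pvDirs.map (fun d => (r + d.1, c + d.2)) = pvNbrs (r, c) := by
  simp [pvDirs, pvNbrs, Prod.ext_iff]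
  omega

theorem pv_stepA (land : List (List Int)) (num : Int) (fuel : Nat) (r c : Int)
    (rest : List (Int × Int)) (check : List (List Int)) (dict : PySem.Dict Int Int)
    (hnum : 1 ≤ num) (hw : pvWf land check) :
    pvBfsA land (pvN land) (pvM land) num (fuel + 1) ((r, c) :: rest) check dict
      = pvBfsA land (pvN land) (pvM land) num fuel
          (rest ++ pvSelA land check (pvNbrs (r, c)))
          (pvMark num check (pvSelA land check (pvNbrs (r, c))))
          (dict.modify num 0 (· + 1)) := by
  have h1 : pvDirs.foldl (fun (st : List (List Int) × List (Int × Int)) d =>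
      let nr := r + d.1
      let nc := c + d.2
      if 0 ≤ nr ∧ nr < pvN land ∧ 0 ≤ nc ∧ nc < pvM land ∧
          pvIdx2 land nr nc = 1 ∧ pvIdx2 st.1 nr nc = 0 then
        (pvSet2 st.1 nr nc num, st.2 ++ [(nr, nc)])
      else st) (check, ([] : List (Int × Int)))
      = (pvMark num check (pvSelA land check (pvNbrs (r, c))),
          [] ++ pvSelA land check (pvNbrs (r, c))) := by
    rw [← pv_innerA land num hnum (pvNbrs (r, c)) (pv_nbrs_nodup _) check [] hw]
    rw [← pv_dirs_map r c, List.foldl_map]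
  show (let dict' := dict.modify num 0 (· + 1);
    let st := pvDirs.foldl (fun (st : List (List Int) × List (Int × Int)) d =>
      let nr := r + d.1
      let nc := c + d.2
      if 0 ≤ nr ∧ nr < pvN land ∧ 0 ≤ nc ∧ nc < pvM land ∧
          pvIdx2 land nr nc = 1 ∧ pvIdx2 st.1 nr nc = 0 then
        (pvSet2 st.1 nr nc num, st.2 ++ [(nr, nc)])
      else st) (check, ([] : List (Int × Int)))
    pvBfsA land (pvN land) (pvM land) num fuel (rest ++ st.2) st.1 dict') = _
  rw [h1]
  rfl

theorem pvBfsA_run (land : List (List Int)) (seed : Int × Int) (num : Int)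
    (check₀ : List (List Int)) (dict₀ : PySem.Dict Int Int)
    (hctx : pvBfsCtx land seed num check₀) :
    ∀ (fuel : Nat) (W : List (Int × Int)) (check : List (List Int)) (dict : PySem.Dict Int Int),
      pvBfsInv land seed num check₀ dict₀ W check dict →
      4 * (pvUf land check).card + W.length < fuel →
      pvBfsPost land seed num check₀ dict₀ (pvBfsA land (pvN land) (pvM land) num fuel W check dict) := by
  obtain ⟨hw₀, hnum, hseedoil, hseed0, hfresh, hclosed₀⟩ := hctx
  have hnum0 : num ≠ 0 := by omega
  intro fuel
  induction fuel with
  | zero => intro W check dict _ hfuel; omega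
  | succ fuel ih =>
    intro W check dict hinv hfuel
    obtain ⟨hw, hoff, hin, hseedn, hWnd, hWmem, hcl, hdn, hdk⟩ := hinv
    cases W with
    | nil =>
      have hres : pvBfsA land (pvN land) (pvM land) num (fuel + 1) [] check dict
        = (check, dict) := rfl
      rw [hres]
      refine ⟨hw, ?_, ?_, by simpa using hdn, hdk⟩
      · intro p _ hpoil hpconn
        have hmain : pvInGrid land p ∧ pvIdx2 check p.1 p.2 = num := by
          refine pv_closed_conn (S := fun v => pvInGrid land v ∧ pvIdx2 check v.1 v.2 = num)
            ?_ ⟨hseedoil.1, hseedn⟩ hpconn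
          intro v q hv hadj
          have hq0 : pvIdx2 check q.1 q.2 ≠ 0 :=
            hcl v hv.1 hv.2 (by simp) q hadj
          refine ⟨hadj.2.1.1, ?_⟩
          by_contra hqn
          have he1 := hoff q hadj.2.1.1 hqn
          have hqconn : pvConn land seed q :=
            Relation.ReflTransGen.tail (hin v hv.1 hv.2).2 hadj
          have he2 := pv_comp_unmarked hclosed₀ hseed0 hqconn hadj.2.1
          rw [he1, he2] at hq0
          exact hq0 rfl
        exact hmain.2
      · intro p hp hnot
        by_cases hpn : pvIdx2 check p.1 p.2 = num
        · exact absurd ⟨(hin p hp hpn).1, (hin p hp hpn).2⟩ hnot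
        · exact hoff p hp hpn
    | cons w rest =>
      obtain ⟨r, c⟩ := w
      have hselP := pv_selA_sub land check (pvNbrs (r, c))
      set sel := pvSelA land check (pvNbrs (r, c)) with hseldef
      have hselgrid : ∀ x ∈ sel, pvInGrid land x := fun x hx => ((hselP x hx).1).1
      have hseloil : ∀ x ∈ sel, pvOil land x :=
        fun x hx => ⟨((hselP x hx).1).1, ((hselP x hx).1).2.1⟩
      have hsel0 : ∀ x ∈ sel, pvIdx2 check x.1 x.2 = 0 := fun x hx => ((hselP x hx).1).2.2
      have hselnd : sel.Nodup := (pv_nbrs_nodup _).filter _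
      have hwmem := hWmem (r, c) (by simp)
      have hwoil : pvOil land (r, c) := (hin _ hwmem.1 hwmem.2).1
      have hwconn : pvConn land seed (r, c) := (hin _ hwmem.1 hwmem.2).2
      have hC' : pvWf land (pvMark num check sel) := pv_wf_mark num sel hw
      have hmarkidx : ∀ p, pvInGrid land p →
          pvIdx2 (pvMark num check sel) p.1 p.2 = if p ∈ sel then num else pvIdx2 check p.1 p.2 :=
        pv_idx2_mark num sel check hw hselgrid
      have hrestnd : rest.Nodup := hWnd.of_cons
      have hdisj : ∀ x ∈ rest, x ∉ sel := by
        intro x hx hxs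
        have h1 := (hWmem x (by simp [hx])).2
        have h2 := hsel0 x hxs
        rw [h2] at h1
        exact hnum0 h1.symm
      have hVf : pvVf land (pvMark num check sel) num = pvVf land check num ∪ sel.toFinset := by
        ext q
        simp only [pvVf, Finset.mem_filter, Finset.mem_union, List.mem_toFinset]
        constructor
        · rintro ⟨hg, hval⟩
          by_cases hq : q ∈ sel
          · exact Or.inr hq
          · rw [hmarkidx q (pv_mem_gridF.mp hg), if_neg hq] at hval
            exact Or.inl ⟨hg, hval⟩
        · rintro (⟨hg, hval⟩ | hq)
          · refine ⟨hg, ?_⟩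
            have hqns : q ∉ sel := by
              intro hqs
              rw [hsel0 q hqs] at hval
              exact hnum0 hval.symm
            rw [hmarkidx q (pv_mem_gridF.mp hg), if_neg hqns]
            exact hval
          · refine ⟨pv_mem_gridF.mpr (hselgrid q hq), ?_⟩
            rw [hmarkidx q (hselgrid q hq), if_pos hq]
      have hVdisj : Disjoint (pvVf land check num) sel.toFinset := by
        rw [Finset.disjoint_left]
        intro q hq1 hq2
        simp only [pvVf, Finset.mem_filter] at hq1
        rw [List.mem_toFinset] at hq2
        rw [hsel0 q hq2] at hq1
        exact hnum0 hq1.2.symm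
      have hVcard : (pvVf land (pvMark num check sel) num).card
          = (pvVf land check num).card + sel.length := by
        rw [hVf, Finset.card_union_of_disjoint hVdisj, List.toFinset_card_of_nodup hselnd]
      have hUf : pvUf land (pvMark num check sel) = pvUf land check \ sel.toFinset := by
        ext q
        simp only [pvUf, Finset.mem_filter, Finset.mem_sdiff, List.mem_toFinset]
        constructor
        · rintro ⟨hg, hl, hval⟩
          have hqns : q ∉ sel := by
            intro hqs
            rw [hmarkidx q (pv_mem_gridF.mp hg), if_pos hqs] at hval
            exact hnum0 hval
          rw [hmarkidx q (pv_mem_gridF.mp hg), if_neg hqns] at hval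
          exact ⟨⟨hg, hl, hval⟩, hqns⟩
        · rintro ⟨⟨hg, hl, hval⟩, hqns⟩
          refine ⟨hg, hl, ?_⟩
          rw [hmarkidx q (pv_mem_gridF.mp hg), if_neg hqns]
          exact hval
      have hUsub : sel.toFinset ⊆ pvUf land check := by
        intro q hq
        rw [List.mem_toFinset] at hq
        simp only [pvUf, Finset.mem_filter]
        exact ⟨pv_mem_gridF.mpr (hselgrid q hq), (hseloil q hq).2, hsel0 q hq⟩
      have hUcard : (pvUf land (pvMark num check sel)).card + sel.length
          = (pvUf land check).card := by
        rw [hUf, ← List.toFinset_card_of_nodup hselnd]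
        exact Finset.card_sdiff_add_card_eq_card hUsub
      rw [pv_stepA land num fuel r c rest check dict hnum hw, ← hseldef]
      apply ih
      · refine ⟨hC', ?_, ?_, ?_, ?_, ?_, ?_, ?_, ?_⟩
        · intro p hp hpn
          rw [hmarkidx p hp] at hpn ⊢
          by_cases hmem : p ∈ sel
          · rw [if_pos hmem] at hpn; exact absurd rfl hpn
          · rw [if_neg hmem] at hpn ⊢; exact hoff p hp hpn
        · intro p hp hpn
          rw [hmarkidx p hp] at hpn
          by_cases hmem : p ∈ sel
          · refine ⟨hseloil p hmem, ?_⟩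
            exact Relation.ReflTransGen.tail hwconn
              (pv_nbrs_adj hwoil (hseloil p hmem) (hselP p hmem).2)
          · rw [if_neg hmem] at hpn; exact hin p hp hpn
        · have hseedns : seed ∉ sel := by
            intro hs
            rw [hsel0 seed hs] at hseedn
            exact hnum0 hseedn.symm
          rw [hmarkidx seed hseedoil.1, if_neg hseedns]
          exact hseedn
        · exact hrestnd.append hselnd (fun x hx => hdisj x hx)
        · intro w' hw'
          rcases List.mem_append.mp hw' with hx | hx
          · have h1 := hWmem w' (by simp [hx])
            refine ⟨h1.1, ?_⟩
            rw [hmarkidx w' h1.1]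
            by_cases hmem : w' ∈ sel
            · rw [if_pos hmem]
            · rw [if_neg hmem]; exact h1.2
          · refine ⟨hselgrid w' hx, ?_⟩
            rw [hmarkidx w' (hselgrid w' hx), if_pos hx]
        · intro v hv hvn hvnot q hadj
          have hqgrid : pvInGrid land q := hadj.2.1.1
          rw [hmarkidx q hqgrid]
          by_cases hqsel : q ∈ sel
          · rw [if_pos hqsel]; exact hnum0
          · rw [if_neg hqsel]
            by_cases hvw : v = (r, c)
            · subst hvw
              have hqn : q ∈ pvNbrs (r, c) := pv_adj_mem_nbrs hadj
              intro hq0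
              exact hqsel (List.mem_filter.mpr ⟨hqn,
                decide_eq_true (show pvElig land check q from ⟨hqgrid, hadj.2.1.2, hq0⟩)⟩)
            · have hvsel : v ∉ sel := fun hs => hvnot (List.mem_append.mpr (Or.inr hs))
              have hvold : pvIdx2 check v.1 v.2 = num := by
                rw [hmarkidx v hv, if_neg hvsel] at hvn; exact hvn
              have hvnW : v ∉ (r, c) :: rest := by
                intro hmem
                rcases List.mem_cons.mp hmem with h | h
                · exact hvw h
                · exact hvnot (List.mem_append.mpr (Or.inl h))
              exact hcl v hv hvold hvnW q hadj
        · rw [PySem.Dict.getD_modify_self, hdn, hVcard]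
          simp only [List.length_append, List.length_cons]
          push_cast
          ring
        · intro k hk
          rw [PySem.Dict.getD_modify_of_ne _ _ _ hk]
          exact hdk k hk
      · simp only [List.length_append, List.length_cons] at hfuel ⊢
        omega

-- ---- the DFS of B ----

noncomputable def pvUfB (land : List (List Int)) (seen : List (Int × Int)) : Finset (Int × Int) :=
  (pvGridF land).filter (fun q => pvIdx2 land q.1 q.2 = 1 ∧ q ∉ seen)

def pvDfsInv (land : List (List Int)) (seeds : List (Int × Int))
    (stack seen : List (Int × Int)) : Prop :=
  seen.Nodup ∧
  (∀ q ∈ seen, pvOil land q ∧ ∃ s ∈ seeds, pvConn land s q) ∧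
  (∀ s ∈ seeds, s ∈ seen) ∧
  stack.Nodup ∧ (∀ w ∈ stack, w ∈ seen) ∧
  (∀ v ∈ seen, v ∉ stack → ∀ q, pvAdj land v q → q ∈ seen)

abbrev pvEligB (land : List (List Int)) (seen : List (Int × Int)) (q : Int × Int) : Prop :=
  pvInGrid land q ∧ pvIdx2 land q.1 q.2 = 1 ∧ q ∉ seen

def pvSelB (land : List (List Int)) (seen : List (Int × Int)) (ns : List (Int × Int)) :
    List (Int × Int) :=
  ns.filter (fun q => decide (pvEligB land seen q))

theorem pv_selB_sub (land : List (List Int)) (seen : List (Int × Int)) (ns : List (Int × Int)) :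
    ∀ q ∈ pvSelB land seen ns, pvEligB land seen q ∧ q ∈ ns := by
  intro q hq
  simp only [pvSelB, List.mem_filter, decide_eq_true_eq] at hq
  exact ⟨hq.2, hq.1⟩

theorem pv_set_add_fresh {s : PySem.Set (Int × Int)} {q : Int × Int} (h : q ∉ s) :
    PySem.Set.add s q = s ++ [q] := by
  simp [PySem.Set.add, h]

theorem pv_innerB (land : List (List Int)) :
    ∀ (ns : List (Int × Int)), ns.Nodup → ∀ (seen : PySem.Set (Int × Int)) (stack : List (Int × Int)),
      ns.foldl (fun (st : PySem.Set (Int × Int) × List (Int × Int)) q =>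
          if 0 ≤ q.1 ∧ q.1 < pvN land ∧ 0 ≤ q.2 ∧ q.2 < pvM land ∧
              pvIdx2 land q.1 q.2 = 1 ∧ q ∉ st.1 then
            (PySem.Set.add st.1 q, st.2 ++ [q])
          else st) (seen, stack)
        = (seen ++ pvSelB land seen ns, stack ++ pvSelB land seen ns) := by
  intro ns
  induction ns with
  | nil => intro _ seen stack; simp [pvSelB]
  | cons q ns ih =>
    intro hnd seen stack
    have hnd' : ns.Nodup := hnd.of_cons
    have hqns : q ∉ ns := by simp at hnd; exact hnd.1
    have hiff : (0 ≤ q.1 ∧ q.1 < pvN land ∧ 0 ≤ q.2 ∧ q.2 < pvM land ∧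
        pvIdx2 land q.1 q.2 = 1 ∧ q ∉ seen) ↔ pvEligB land seen q := by
      unfold pvEligB pvInGrid
      tauto
    simp only [List.foldl_cons]
    by_cases hcond : pvEligB land seen q
    · rw [if_pos (hiff.mpr hcond)]
      rw [pv_set_add_fresh hcond.2.2]
      rw [ih hnd' (seen ++ [q]) (stack ++ [q])]
      have hsel : pvSelB land (seen ++ [q]) ns = pvSelB land seen ns := by
        apply List.filter_congr
        intro x hx
        have hxq : x ≠ q := fun he => hqns (he ▸ hx)
        simp only [decide_eq_decide]
        unfold pvEligB
        simp [List.mem_append, hxq]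
      have hselcons : pvSelB land seen (q :: ns) = q :: pvSelB land seen ns := by
        simp [pvSelB, List.filter_cons, hcond]
      rw [hsel, hselcons]
      simp [List.append_assoc]
    · rw [if_neg (fun hc => hcond (hiff.mp hc))]
      rw [ih hnd' seen stack]
      have hselcons : pvSelB land seen (q :: ns) = pvSelB land seen ns := by
        simp [pvSelB, List.filter_cons, hcond]
      rw [hselcons]

theorem pv_stepB (land : List (List Int)) (fuel : Nat) (pre : List (Int × Int)) (w : Int × Int)
    (seen : PySem.Set (Int × Int)) :
    pvDfsB land (pvN land) (pvM land) (fuel + 1) (pre ++ [w]) seen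
      = pvDfsB land (pvN land) (pvM land) fuel
          (pre ++ pvSelB land seen (pvNbrs w)) (seen ++ pvSelB land seen (pvNbrs w)) := by
  have hne : pre ++ [w] ≠ [] := by simp
  have hlast : (pre ++ [w]).getLast? = some w := by
    simp
  have hdrop : (pre ++ [w]).dropLast = pre := by
    simp
  conv_lhs => rw [pvDfsB]
  rw [hlast, hdrop]
  simp only []
  rw [pv_innerB land (pvNbrs w) (pv_nbrs_nodup w) seen pre]

theorem pvDfsB_run (land : List (List Int)) (seeds : List (Int × Int))
    (hseeds : ∀ s ∈ seeds, pvOil land s) :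
    ∀ (fuel : Nat) (stack seen : List (Int × Int)),
      pvDfsInv land seeds stack seen →
      4 * (pvUfB land seen).card + stack.length < fuel →
      (pvDfsB land (pvN land) (pvM land) fuel stack seen).Nodup ∧
      (∀ q, q ∈ pvDfsB land (pvN land) (pvM land) fuel stack seen ↔
        ∃ s ∈ seeds, pvConn land s q) := by
  intro fuel
  induction fuel with
  | zero => intro stack seen _ hfuel; omega
  | succ fuel ih =>
    intro stack seen hinv hfuel
    obtain ⟨hsnd, hsconn, hseedsub, hstnd, hstsub, hclo⟩ := hinv
    rcases List.eq_nil_or_concat stack with rfl | ⟨pre, w, hstack⟩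
    · have hres : pvDfsB land (pvN land) (pvM land) (fuel + 1) [] seen = seen := rfl
      rw [hres]
      refine ⟨hsnd, fun q => ⟨fun hq => (hsconn q hq).2, ?_⟩⟩
      rintro ⟨s, hs, hconn⟩
      exact pv_closed_conn (S := fun v => v ∈ seen)
        (fun v q hv hadj => hclo v hv (List.not_mem_nil) q hadj) (hseedsub s hs) hconn
    · rw [List.concat_eq_append] at hstack
      subst hstack
      have hselP := pv_selB_sub land seen (pvNbrs w)
      set sel := pvSelB land seen (pvNbrs w) with hseldef
      have hselgrid : ∀ x ∈ sel, pvInGrid land x := fun x hx => ((hselP x hx).1).1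
      have hseloil : ∀ x ∈ sel, pvOil land x :=
        fun x hx => ⟨((hselP x hx).1).1, ((hselP x hx).1).2.1⟩
      have hselout : ∀ x ∈ sel, x ∉ seen := fun x hx => ((hselP x hx).1).2.2
      have hselnd : sel.Nodup := (pv_nbrs_nodup _).filter _
      have hwseen : w ∈ seen := hstsub w (by simp)
      obtain ⟨hwoil, s, hws, hwconn⟩ := hsconn w hwseen
      have hprend : pre.Nodup := (List.nodup_append.mp hstnd).1
      have hpresub : ∀ x ∈ pre, x ∈ seen := fun x hx => hstsub x (by simp [hx])
      rw [pv_stepB land fuel pre w seen, ← hseldef]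
      apply ih
      · refine ⟨?_, ?_, ?_, ?_, ?_, ?_⟩
        · exact hsnd.append hselnd (fun x hx hxs => hselout x hxs hx)
        · intro q hq
          rcases List.mem_append.mp hq with hq | hq
          · exact hsconn q hq
          · refine ⟨hseloil q hq, s, hws, ?_⟩
            exact hwconn.tail (pv_nbrs_adj hwoil (hseloil q hq) (hselP q hq).2)
        · intro x hx
          exact List.mem_append.mpr (Or.inl (hseedsub x hx))
        · exact hprend.append hselnd (fun x hx hxs => hselout x hxs (hpresub x hx))
        · intro x hx
          rcases List.mem_append.mp hx with hx | hx
          · exact List.mem_append.mpr (Or.inl (hpresub x hx))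
          · exact List.mem_append.mpr (Or.inr hx)
        · intro v hv hvnot q hadj
          have hvsel : v ∉ sel := fun hs' => hvnot (List.mem_append.mpr (Or.inr hs'))
          have hvseen : v ∈ seen := by
            rcases List.mem_append.mp hv with h | h
            · exact h
            · exact absurd h hvsel
          by_cases hvw : v = w
          · subst hvw
            have hqn : q ∈ pvNbrs v := pv_adj_mem_nbrs hadj
            by_cases hqseen : q ∈ seen
            · exact List.mem_append.mpr (Or.inl hqseen)
            · refine List.mem_append.mpr (Or.inr ?_)
              exact List.mem_filter.mpr ⟨hqn, decide_eq_true
                (show pvEligB land seen q from ⟨hadj.2.1.1, hadj.2.1.2, hqseen⟩)⟩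
          · have hvns : v ∉ pre ++ [w] := by
              intro hmem
              rcases List.mem_append.mp hmem with h | h
              · exact hvnot (List.mem_append.mpr (Or.inl h))
              · exact hvw (List.mem_singleton.mp h)
            exact List.mem_append.mpr (Or.inl (hclo v hvseen hvns q hadj))
      · have hUf : pvUfB land (seen ++ sel) = pvUfB land seen \ sel.toFinset := by
          ext q
          simp only [pvUfB, Finset.mem_filter, Finset.mem_sdiff, List.mem_toFinset,
            List.mem_append]
          tauto
        have hUsub : sel.toFinset ⊆ pvUfB land seen := by
          intro q hq
          rw [List.mem_toFinset] at hq
          simp only [pvUfB, Finset.mem_filter]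
          exact ⟨pv_mem_gridF.mpr (hselgrid q hq), (hseloil q hq).2, hselout q hq⟩
        have hUcard : (pvUfB land (seen ++ sel)).card + sel.length = (pvUfB land seen).card := by
          rw [hUf, ← List.toFinset_card_of_nodup hselnd]
          exact Finset.card_sdiff_add_card_eq_card hUsub
        simp only [List.length_append, List.length_cons] at hfuel ⊢
        omega

-- ---- the outer scan of A ----

def pvCells (land : List (List Int)) : List (Int × Int) :=
  (PySem.List.pyRange 0 (pvN land) 1).flatMap
    (fun i => (PySem.List.pyRange 0 (pvM land) 1).map (fun j => (i, j)))

theorem pv_mem_cells {land : List (List Int)} {p : Int × Int} :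
    p ∈ pvCells land ↔ pvInGrid land p := by
  simp only [pvCells, List.mem_flatMap, List.mem_map, PySem.List.mem_pyRange_one]
  constructor
  · rintro ⟨i, hi, j, hj, rfl⟩
    exact ⟨hi.1, hi.2, hj.1, hj.2⟩
  · intro h
    exact ⟨p.1, ⟨h.1, h.2.1⟩, p.2, ⟨h.2.2.1, h.2.2.2⟩, rfl⟩

theorem pv_gridF_card (land : List (List Int)) :
    (pvGridF land).card = land.length * (land.headD []).length := by
  simp only [pvGridF, Finset.card_product, Int.card_Ico, pvN, pvM]
  simp

theorem pv_foldl_add_nodup {α : Type} [BEq α] [LawfulBEq α] :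
    ∀ (l : List α) (s : PySem.Set α), l.Nodup → (∀ x ∈ l, x ∉ s) →
      l.foldl PySem.Set.add s = s ++ l := by
  intro l
  induction l with
  | nil => intro s _ _; simp
  | cons x l ih =>
    intro s hnd hdis
    have hx : x ∉ s := hdis x (by simp)
    simp only [List.foldl_cons]
    rw [show PySem.Set.add s x = s ++ [x] from by simp [PySem.Set.add, hx]]
    rw [ih (s ++ [x]) hnd.of_cons ?_]
    · simp
    · intro y hy
      simp only [List.mem_append, List.mem_singleton]
      rintro (h | rfl)
      · exact hdis y (by simp [hy]) h
      · exact (List.nodup_cons.mp hnd).1 hy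

theorem pv_ofList_nodup {α : Type} [BEq α] [LawfulBEq α] {l : List α} (h : l.Nodup) :
    PySem.Set.ofList l = l := by
  rw [PySem.Set.ofList_eq_foldl]
  simpa using pv_foldl_add_nodup l [] h (by simp)

-- the final state (check_map, hole_dict, hole_num) of A's scan
def pvScanSt (land : List (List Int)) : List (List Int) × PySem.Dict Int Int × Int :=
  (PySem.List.pyRange 0 (pvN land) 1).foldl
    (fun (st : List (List Int) × PySem.Dict Int Int × Int) i =>
      (PySem.List.pyRange 0 (pvM land) 1).foldl (fun st j =>
        if pvIdx2 land i j = 1 ∧ pvIdx2 st.1 i j = 0 then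
          let check := pvSet2 st.1 i j st.2.2
          let dict := st.2.1.insert st.2.2 0
          let r := pvBfsA land (pvN land) (pvM land) st.2.2
            (land.length * (land.headD []).length * 5 + 5) [(i, j)] check dict
          (r.1, r.2, st.2.2 + 1)
        else st) st)
    (List.replicate land.length (List.replicate (land.headD []).length 0),
      PySem.Dict.empty, 1)

def pvScanInv (land : List (List Int)) (P : List (Int × Int))
    (st : List (List Int) × PySem.Dict Int Int × Int) : Prop :=
  pvWf land st.1 ∧ 1 ≤ st.2.2 ∧
  (∀ p, pvInGrid land p → (1 ≤ pvIdx2 st.1 p.1 p.2 ∧ pvIdx2 st.1 p.1 p.2 < st.2.2) ∨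
    pvIdx2 st.1 p.1 p.2 = 0) ∧
  (∀ p, pvInGrid land p →
    (pvIdx2 st.1 p.1 p.2 ≠ 0 ↔ pvOil land p ∧ ∃ s ∈ P, pvOil land s ∧ pvConn land s p)) ∧
  (∀ p q, pvInGrid land p → pvInGrid land q → pvIdx2 st.1 p.1 p.2 ≠ 0 → pvIdx2 st.1 q.1 q.2 ≠ 0 →
    (pvIdx2 st.1 p.1 p.2 = pvIdx2 st.1 q.1 q.2 ↔ pvConn land p q)) ∧
  (∀ t, t ≠ 0 → (∃ p, pvInGrid land p ∧ pvIdx2 st.1 p.1 p.2 = t) →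
    st.2.1.getD t 0 = ((pvVf land st.1 t).card : Int))

theorem pvScan_run (land : List (List Int)) (hpre : Pre_solution land) :
    pvScanInv land (pvCells land) (pvScanSt land) := by
  have hcard := pv_gridF_card land
  unfold pvScanSt
  -- flatten the nested fold into a single fold over all cells in row-major order
  have hflat : ∀ (li lj : List Int)
      (init : List (List Int) × PySem.Dict Int Int × Int),
      li.foldl (fun st i => lj.foldl (fun st j =>
        if pvIdx2 land i j = 1 ∧ pvIdx2 st.1 i j = 0 then
          let check := pvSet2 st.1 i j st.2.2
          let dict := st.2.1.insert st.2.2 0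
          let r := pvBfsA land (pvN land) (pvM land) st.2.2
            (land.length * (land.headD []).length * 5 + 5) [(i, j)] check dict
          (r.1, r.2, st.2.2 + 1)
        else st) st) init
      = (li.flatMap (fun i => lj.map (fun j => (i, j)))).foldl (fun st p =>
        if pvIdx2 land p.1 p.2 = 1 ∧ pvIdx2 st.1 p.1 p.2 = 0 then
          let check := pvSet2 st.1 p.1 p.2 st.2.2
          let dict := st.2.1.insert st.2.2 0
          let r := pvBfsA land (pvN land) (pvM land) st.2.2
            (land.length * (land.headD []).length * 5 + 5) [(p.1, p.2)] check dict
          (r.1, r.2, st.2.2 + 1)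
        else st) init := by
    intro li lj
    induction li with
    | nil => intro init; simp
    | cons i li ih =>
      intro init
      simp only [List.foldl_cons, List.flatMap_cons, List.foldl_append, List.foldl_map]
      rw [ih]
  rw [hflat]
  show pvScanInv land ([] ++ pvCells land) _
  refine pv_foldl_inv (pvScanInv land) _ (pvCells land) []
    (List.replicate land.length (List.replicate (land.headD []).length 0),
      PySem.Dict.empty, 1) ?_ ?_
  · -- the initial state satisfies the invariant
    refine ⟨pv_wf_check0 land, le_refl 1, ?_, ?_, ?_, ?_⟩
    · intro p _
      exact Or.inr (pv_idx2_check0 land p)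
    · intro p _
      rw [pv_idx2_check0 land p]
      simp
    · intro p q _ _ hp _
      exact absurd (pv_idx2_check0 land p) hp
    · intro t ht ⟨p, _, hp⟩
      rw [pv_idx2_check0 land p] at hp
      exact absurd hp.symm ht
  · -- one scan step preserves the invariant
    rintro Q x st' hx hinv
    obtain ⟨hwf, hhole, hrange, hmark, hclass, hcount⟩ := hinv
    obtain ⟨check, dict, hole⟩ := st'
    simp only at hwf hhole hrange hmark hclass hcount ⊢
    have hxg : pvInGrid land x := pv_mem_cells.mp hx
    by_cases hcond : pvIdx2 land x.1 x.2 = 1 ∧ pvIdx2 check x.1 x.2 = 0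
    · -- a fresh oil cell: label its whole component with the label `hole` via BFS
      have hxoil : pvOil land x := ⟨hxg, hcond.1⟩
      have hole0 : hole ≠ 0 := by omega
      -- the currently marked region is closed under adjacency
      have hclosed : ∀ v q, pvInGrid land v → pvIdx2 check v.1 v.2 ≠ 0 → pvAdj land v q →
          pvIdx2 check q.1 q.2 ≠ 0 := by
        intro v q hv hvm hadj
        obtain ⟨_, s, hsQ, hsoil, hsconn⟩ := (hmark v hv).mp hvm
        exact (hmark q hadj.2.1.1).mpr ⟨hadj.2.1, s, hsQ, hsoil, hsconn.tail hadj⟩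
      have hfresh : ∀ p, pvInGrid land p → pvIdx2 check p.1 p.2 ≠ hole := by
        intro p hp
        rcases hrange p hp with ⟨h1, h2⟩ | h1 <;> omega
      have hctx : pvBfsCtx land x hole check := ⟨hwf, hhole, hxoil, hcond.2, hfresh, hclosed⟩
      set check₁ := pvSet2 check x.1 x.2 hole with hc1def
      set dict₁ := dict.insert hole 0 with hd1def
      have hw1 : pvWf land check₁ := pv_wf_set2 hwf _ _ _
      have hidx1 : ∀ p, pvInGrid land p →
          pvIdx2 check₁ p.1 p.2 = if p = x then hole else pvIdx2 check p.1 p.2 := by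
        intro p hp
        by_cases hpx : p = x
        · subst hpx; simp [hc1def, pv_idx2_set2_self hwf hp]
        · simp [hc1def, hpx, pv_idx2_set2_ne hwf hxg hp hpx]
      have hV1 : pvVf land check₁ hole = {x} := by
        ext q
        simp only [pvVf, Finset.mem_filter, Finset.mem_singleton]
        constructor
        · rintro ⟨hg, hval⟩
          by_contra hqx
          rw [hidx1 q (pv_mem_gridF.mp hg), if_neg hqx] at hval
          exact hfresh q (pv_mem_gridF.mp hg) hval
        · rintro rfl
          refine ⟨pv_mem_gridF.mpr hxg, ?_⟩
          rw [hidx1 q hxg, if_pos rfl]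
      have hinv1 : pvBfsInv land x hole check dict₁ [x] check₁ dict₁ := by
        refine ⟨hw1, ?_, ?_, ?_, ?_, ?_, ?_, ?_, ?_⟩
        · intro p hp hpn
          rw [hidx1 p hp] at hpn ⊢
          by_cases hpx : p = x
          · rw [if_pos hpx] at hpn; exact absurd rfl hpn
          · rw [if_neg hpx]
        · intro p hp hpn
          rw [hidx1 p hp] at hpn
          by_cases hpx : p = x
          · subst hpx; exact ⟨hxoil, Relation.ReflTransGen.refl⟩
          · rw [if_neg hpx] at hpn; exact absurd hpn (hfresh p hp)
        · rw [hidx1 x hxg, if_pos rfl]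
        · simp
        · intro w hw
          rw [List.mem_singleton] at hw
          subst hw
          exact ⟨hxg, by rw [hidx1 w hxg, if_pos rfl]⟩
        · intro v hv hvn hvnot q _
          exfalso
          rw [hidx1 v hv] at hvn
          by_cases hvx : v = x
          · exact hvnot (by simp [hvx])
          · rw [if_neg hvx] at hvn; exact hfresh v hv hvn
        · rw [hd1def, PySem.Dict.getD_insert_self, hV1]
          simp
        · intro k hk
          rfl
      have hfuelok : 4 * (pvUf land check₁).card + ([x] : List (Int × Int)).length
          < land.length * (land.headD []).length * 5 + 5 := by
        have hsub : pvUf land check₁ ⊆ pvGridF land := Finset.filter_subset _ _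
        have := Finset.card_le_card hsub
        rw [hcard] at this
        simp only [List.length_singleton]
        omega
      have hpost := pvBfsA_run land x hole check dict₁ hctx
        (land.length * (land.headD []).length * 5 + 5) [x] check₁ dict₁ hinv1 hfuelok
      obtain ⟨hwf', hcomp, hrest, hcnt, hoth⟩ := hpost
      set res := pvBfsA land (pvN land) (pvM land) hole
        (land.length * (land.headD []).length * 5 + 5) [x] check₁ dict₁ with hresdef
      -- the labelled component had label 0 before
      have hcomp0 : ∀ p, pvOil land p → pvConn land x p → pvIdx2 check p.1 p.2 = 0 :=
        fun p hoil hconn => pv_comp_unmarked hclosed hcond.2 hconn hoil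
      have hidx' : ∀ p, pvInGrid land p → (pvIdx2 res.1 p.1 p.2 = hole ↔
          pvOil land p ∧ pvConn land x p) := by
        intro p hp
        constructor
        · intro hval
          by_contra hnot
          rw [hrest p hp hnot] at hval
          exact hfresh p hp hval
        · intro hyes
          exact hcomp p hp hyes.1 hyes.2
      have hidxold : ∀ p, pvInGrid land p → ¬ (pvOil land p ∧ pvConn land x p) →
          pvIdx2 res.1 p.1 p.2 = pvIdx2 check p.1 p.2 := hrest
      -- the step of the scan really produced (res.1, res.2, hole + 1)
      rw [if_pos hcond]
      have htup : ((res.1, res.2, hole + 1) :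
          List (List Int) × PySem.Dict Int Int × Int).2.2 = hole + 1 := rfl
      refine ⟨hwf', by omega, ?_, ?_, ?_, ?_⟩
      · intro p hp
        by_cases hpc : pvOil land p ∧ pvConn land x p
        · left
          rw [(hidx' p hp).mpr hpc]
          omega
        · rw [hidxold p hp hpc]
          rcases hrange p hp with ⟨h1, h2⟩ | h1
          · left; omega
          · right; exact h1
      · intro p hp
        constructor
        · intro hval
          by_cases hpc : pvOil land p ∧ pvConn land x p
          · exact ⟨hpc.1, x, by simp, hxoil, hpc.2⟩
          · rw [hidxold p hp hpc] at hval
            obtain ⟨hoil, s, hsQ, hsoil, hsconn⟩ := (hmark p hp).mp hval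
            exact ⟨hoil, s, by simp [hsQ], hsoil, hsconn⟩
        · rintro ⟨hoil, s, hsm, hsoil, hsconn⟩
          by_cases hpc : pvOil land p ∧ pvConn land x p
          · rw [(hidx' p hp).mpr hpc]; omega
          · rw [hidxold p hp hpc]
            rcases List.mem_append.mp hsm with hsQ | hsx
            · exact (hmark p hp).mpr ⟨hoil, s, hsQ, hsoil, hsconn⟩
            · rw [List.mem_singleton] at hsx
              subst hsx
              exact absurd ⟨hoil, hsconn⟩ hpc
      · intro p q hp hq hpn hqn
        by_cases hpc : pvOil land p ∧ pvConn land x p <;>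
          by_cases hqc : pvOil land q ∧ pvConn land x q
        · rw [(hidx' p hp).mpr hpc, (hidx' q hq).mpr hqc]
          simp only [true_iff]
          exact Relation.ReflTransGen.trans (pv_conn_symm hpc.2) hqc.2
        · rw [(hidx' p hp).mpr hpc, hidxold q hq hqc]
          rw [hidxold q hq hqc] at hqn
          constructor
          · intro heq
            exact absurd heq.symm (hfresh q hq)
          · intro hconn
            exact absurd ⟨(hmark q hq).mp hqn |>.1, hpc.2.trans hconn⟩ hqc
        · rw [(hidx' q hq).mpr hqc, hidxold p hp hpc]
          rw [hidxold p hp hpc] at hpn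
          constructor
          · intro heq
            exact absurd heq (hfresh p hp)
          · intro hconn
            exact absurd ⟨(hmark p hp).mp hpn |>.1, hqc.2.trans (pv_conn_symm hconn)⟩ hpc
        · rw [hidxold p hp hpc, hidxold q hq hqc]
          rw [hidxold p hp hpc] at hpn
          rw [hidxold q hq hqc] at hqn
          exact hclass p q hp hq hpn hqn
      · intro t ht hocc
        obtain ⟨p, hp, hpt⟩ := hocc
        by_cases hthole : t = hole
        · subst hthole
          exact hcnt
        · have hVsame : pvVf land res.1 t = pvVf land check t := by
            ext q
            simp only [pvVf, Finset.mem_filter]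
            constructor
            · rintro ⟨hg, hval⟩
              by_cases hqc : pvOil land q ∧ pvConn land x q
              · rw [(hidx' q (pv_mem_gridF.mp hg)).mpr hqc] at hval
                exact absurd hval.symm hthole
              · rw [hidxold q (pv_mem_gridF.mp hg) hqc] at hval
                exact ⟨hg, hval⟩
            · rintro ⟨hg, hval⟩
              refine ⟨hg, ?_⟩
              by_cases hqc : pvOil land q ∧ pvConn land x q
              · rw [hcomp0 q hqc.1 hqc.2] at hval
                exact absurd hval.symm ht
              · rw [hidxold q (pv_mem_gridF.mp hg) hqc]
                exact hval
          rw [hVsame, hoth t hthole, hd1def, PySem.Dict.getD_insert_of_ne _ _ _ hthole]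
          apply hcount t ht
          refine ⟨p, hp, ?_⟩
          by_cases hpc : pvOil land p ∧ pvConn land x p
          · rw [(hidx' p hp).mpr hpc] at hpt
            exact absurd hpt.symm hthole
          · rw [hidxold p hp hpc] at hpt
            exact hpt
    · -- nothing to do: either not oil, or already labelled
      rw [if_neg hcond]
      refine ⟨hwf, hhole, hrange, ?_, hclass, hcount⟩
      intro p hp
      rw [hmark p hp]
      constructor
      · rintro ⟨hoil, s, hsQ, hsoil, hsconn⟩
        exact ⟨hoil, s, by simp [hsQ], hsoil, hsconn⟩
      · rintro ⟨hoil, s, hsm, hsoil, hsconn⟩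
        rcases List.mem_append.mp hsm with hsQ | hsx
        · exact ⟨hoil, s, hsQ, hsoil, hsconn⟩
        · rw [List.mem_singleton] at hsx
          subst hsx
          have hsm2 : pvIdx2 check s.1 s.2 ≠ 0 := by
            intro h0
            exact hcond ⟨hsoil.2, h0⟩
          obtain ⟨_, s', hs'Q, hs'oil, hs'conn⟩ := (hmark s hsoil.1).mp hsm2
          exact ⟨hoil, s', hs'Q, hs'oil, hs'conn.trans hsconn⟩

-- ---- per-column values ----

noncomputable def pvColSet (land check : List (List Int)) (tmp : List Int) : Finset (Int × Int) :=
  (pvGridF land).filter (fun q => pvIdx2 check q.1 q.2 ≠ 0 ∧ pvIdx2 check q.1 q.2 ∈ tmp)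

-- the per-column value computed by A equals the per-column value computed by B
theorem pv_col_eq (land : List (List Int)) (hpre : Pre_solution land) (c : Int)
    (hc0 : 0 ≤ c) (hcM : c < pvM land) :
    (((PySem.List.pyRange 0 (pvN land) 1).foldl (fun tmp j =>
        if pvIdx2 (pvScanSt land).1 j c ≠ 0 then
          PySem.Set.add tmp (pvIdx2 (pvScanSt land).1 j c) else tmp)
      PySem.Set.empty).map (fun t => (pvScanSt land).2.1.getD t 0)).sum
    = ((pvDfsB land (pvN land) (pvM land)
        (land.length * (land.headD []).length * 5 + 5)
        (((PySem.List.pyRange 0 (pvN land) 1).filter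
          (fun r => pvIdx2 land r c == 1)).map (fun r => (r, c)))
        (PySem.Set.ofList (((PySem.List.pyRange 0 (pvN land) 1).filter
          (fun r => pvIdx2 land r c == 1)).map (fun r => (r, c))))).length : Int) := by
  obtain ⟨hwf, hhole, hrange, hmark, hclass, hcount⟩ := pvScan_run land hpre
  have hM0 : 0 < (land.headD []).length := by
    have h1 : (0 : Int) < pvM land := lt_of_le_of_lt hc0 hcM
    simp only [pvM] at h1
    exact_mod_cast h1
  -- every oil cell carries a non-zero label in the final check_map
  have hlab : ∀ p, pvInGrid land p → (pvIdx2 (pvScanSt land).1 p.1 p.2 ≠ 0 ↔ pvOil land p) := by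
    intro p hp
    constructor
    · intro hne
      exact ((hmark p hp).mp hne).1
    · intro hoil
      exact (hmark p hp).mpr ⟨hoil, p, pv_mem_cells.mpr hp, hoil, Relation.ReflTransGen.refl⟩
  -- rewrite A's tmp loop into set-of-list form
  have htmp : ((PySem.List.pyRange 0 (pvN land) 1).foldl (fun tmp j =>
        if pvIdx2 (pvScanSt land).1 j c ≠ 0 then
          PySem.Set.add tmp (pvIdx2 (pvScanSt land).1 j c) else tmp)
      PySem.Set.empty)
      = PySem.Set.ofList (((PySem.List.pyRange 0 (pvN land) 1).filter
          (fun j => decide (pvIdx2 (pvScanSt land).1 j c ≠ 0))).map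
          (fun j => pvIdx2 (pvScanSt land).1 j c)) := by
    rw [PySem.List.foldl_ite_eq_foldl_filter, PySem.Set.ofList_eq_foldl, List.foldl_map]
    rfl
  rw [htmp]
  set check := (pvScanSt land).1 with hcheckdef
  set dict := (pvScanSt land).2.1 with hdictdef
  set L := (((PySem.List.pyRange 0 (pvN land) 1).filter
      (fun j => decide (pvIdx2 check j c ≠ 0))).map
      (fun j => pvIdx2 check j c)) with hLdef
  have hmemL : ∀ t, t ∈ L ↔ ∃ j, 0 ≤ j ∧ j < pvN land ∧
      pvIdx2 check j c ≠ 0 ∧ pvIdx2 check j c = t := by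
    intro t
    simp only [hLdef, List.mem_map, List.mem_filter, PySem.List.mem_pyRange_one,
      decide_eq_true_eq]
    constructor
    · rintro ⟨j, ⟨⟨hj0, hjN⟩, hne⟩, rfl⟩
      exact ⟨j, hj0, hjN, hne, rfl⟩
    · rintro ⟨j, hj0, hjN, hne, rfl⟩
      exact ⟨j, ⟨⟨hj0, hjN⟩, hne⟩, rfl⟩
  have hmemT : ∀ t, t ∈ PySem.Set.ofList L ↔ t ∈ L := fun t => PySem.Set.mem_ofList L t
  have hndT : (PySem.Set.ofList L).Nodup := PySem.Set.nodup_ofList L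
  -- A's column sum is the size of the set of cells with a label appearing in column c
  have hAcol : ((PySem.Set.ofList L).map (fun t => dict.getD t 0)).sum
      = ((pvColSet land check (PySem.Set.ofList L)).card : Int) := by
    rw [← List.sum_toFinset _ hndT]
    have hT0 : ∀ t ∈ (PySem.Set.ofList L).toFinset, t ≠ 0 := by
      intro t ht
      rw [List.mem_toFinset, hmemT, hmemL] at ht
      obtain ⟨j, _, _, hne, heq⟩ := ht
      rw [← heq]
      exact hne
    have hstep1 : ∑ t ∈ (PySem.Set.ofList L).toFinset, dict.getD t 0
        = ∑ t ∈ (PySem.Set.ofList L).toFinset, ((pvVf land check t).card : Int) := by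
      apply Finset.sum_congr rfl
      intro t ht
      apply hcount t (hT0 t ht)
      rw [List.mem_toFinset, hmemT, hmemL] at ht
      obtain ⟨j, hj0, hjN, hne, heq⟩ := ht
      exact ⟨(j, c), ⟨hj0, hjN, hc0, hcM⟩, heq⟩
    rw [hstep1, ← Nat.cast_sum]
    congr 1
    rw [← Finset.card_biUnion]
    · congr 1
      ext q
      simp only [Finset.mem_biUnion, List.mem_toFinset, pvColSet, pvVf, Finset.mem_filter]
      constructor
      · rintro ⟨t, ht, hg, hval⟩
        refine ⟨hg, ?_, ?_⟩
        · rw [hval]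
          rw [hmemT, hmemL] at ht
          obtain ⟨j, _, _, hne, heq⟩ := ht
          rw [← heq]; exact hne
        · rw [hval]; exact ht
      · rintro ⟨hg, hne, hmem⟩
        exact ⟨pvIdx2 check q.1 q.2, hmem, hg, rfl⟩
    · intro t ht t' ht' hne
      apply Finset.disjoint_left.mpr
      intro q hq hq'
      simp only [pvVf, Finset.mem_filter] at hq hq'
      exact hne (hq.2 ▸ hq'.2 ▸ rfl)
  rw [hAcol]
  -- B's seeds for this column
  set seeds := (((PySem.List.pyRange 0 (pvN land) 1).filter
      (fun r => pvIdx2 land r c == 1)).map (fun r => (r, c))) with hseedsdef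
  have hseedmem : ∀ s, s ∈ seeds ↔
      0 ≤ s.1 ∧ s.1 < pvN land ∧ s.2 = c ∧ pvIdx2 land s.1 c = 1 := by
    intro s
    simp only [hseedsdef, List.mem_map, List.mem_filter, PySem.List.mem_pyRange_one,
      beq_iff_eq]
    constructor
    · rintro ⟨r, ⟨⟨hr0, hrN⟩, hval⟩, rfl⟩
      exact ⟨hr0, hrN, rfl, hval⟩
    · rintro ⟨h1, h2, h3, h4⟩
      exact ⟨s.1, ⟨⟨h1, h2⟩, h4⟩, by rw [← h3]⟩
  have hseedoil : ∀ s ∈ seeds, pvOil land s := by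
    intro s hs
    obtain ⟨h1, h2, h3, h4⟩ := (hseedmem s).mp hs
    exact ⟨⟨h1, h2, by omega, by omega⟩, by rw [h3]; exact h4⟩
  have hrangend : (PySem.List.pyRange 0 (pvN land) 1).Nodup := by
    show (PySem.List.pyRange 0 ((land.length : Nat) : Int) 1).Nodup
    rw [PySem.List.pyRange_zero_natCast]
    exact (List.nodup_range).map (fun a b h => by exact_mod_cast h)
  have hseednd : seeds.Nodup := by
    refine ((hrangend.filter _).map ?_)
    intro a b h
    simpa using h
  have hofl : PySem.Set.ofList seeds = seeds := pv_ofList_nodup hseednd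
  have hinv : pvDfsInv land seeds seeds seeds := by
    refine ⟨hseednd, ?_, fun s hs => hs, hseednd, fun w hw => hw, ?_⟩
    · intro q hq
      exact ⟨hseedoil q hq, q, hq, Relation.ReflTransGen.refl⟩
    · intro v hv hvn
      exact absurd hv hvn
  have hlen : seeds.length ≤ land.length := by
    have h1 : seeds.length = ((PySem.List.pyRange 0 (pvN land) 1).filter
        (fun r => pvIdx2 land r c == 1)).length := by
      simp [hseedsdef]
    have h2 := List.length_filter_le (fun r => pvIdx2 land r c == 1)
      (PySem.List.pyRange 0 (pvN land) 1)
    have h3 : (PySem.List.pyRange 0 (pvN land) 1).length = land.length := by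
      show (PySem.List.pyRange 0 ((land.length : Nat) : Int) 1).length = land.length
      rw [PySem.List.pyRange_zero_natCast]
      simp
    omega
  have hfuel : 4 * (pvUfB land seeds).card + seeds.length
      < land.length * (land.headD []).length * 5 + 5 := by
    have hsub : pvUfB land seeds ⊆ pvGridF land := Finset.filter_subset _ _
    have h1 := Finset.card_le_card hsub
    rw [pv_gridF_card land] at h1
    have h2 : land.length ≤ land.length * (land.headD []).length :=
      Nat.le_mul_of_pos_right _ hM0
    omega
  rw [hofl]
  obtain ⟨hresnd, hresmem⟩ := pvDfsB_run land seeds hseedoil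
    (land.length * (land.headD []).length * 5 + 5) seeds seeds hinv hfuel
  -- both sides describe the cells reachable from column c
  have hchar : ∀ q, (∃ s ∈ seeds, pvConn land s q) ↔
      (q ∈ pvColSet land check (PySem.Set.ofList L)) := by
    intro q
    constructor
    · rintro ⟨s, hs, hconn⟩
      have hsoil := hseedoil s hs
      have hqoil : pvOil land q := pv_conn_oil hsoil hconn
      obtain ⟨h1, h2, h3, h4⟩ := (hseedmem s).mp hs
      have hseq : s = (s.1, c) := by
        rw [← h3]
      rw [hseq] at hsoil hconn
      simp only [pvColSet, Finset.mem_filter]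
      refine ⟨pv_mem_gridF.mpr hqoil.1, (hlab q hqoil.1).mpr hqoil, ?_⟩
      rw [hmemT, hmemL]
      refine ⟨s.1, h1, h2, (hlab (s.1, c) hsoil.1).mpr hsoil, ?_⟩
      exact (hclass (s.1, c) q hsoil.1 hqoil.1
        ((hlab (s.1, c) hsoil.1).mpr hsoil) ((hlab q hqoil.1).mpr hqoil)).mpr hconn
    · intro hq
      simp only [pvColSet, Finset.mem_filter] at hq
      obtain ⟨hg, hne, hmem⟩ := hq
      have hqg : pvInGrid land q := pv_mem_gridF.mp hg
      have hqoil : pvOil land q := (hlab q hqg).mp hne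
      rw [hmemT, hmemL] at hmem
      obtain ⟨j, hj0, hjN, hjne, hjeq⟩ := hmem
      have hjg : pvInGrid land (j, c) := ⟨hj0, hjN, hc0, hcM⟩
      have hjoil : pvOil land (j, c) := (hlab (j, c) hjg).mp hjne
      have hconn : pvConn land (j, c) q :=
        (hclass (j, c) q hjg hqg hjne hne).mp hjeq
      refine ⟨(j, c), ?_, hconn⟩
      rw [hseedmem]
      exact ⟨hj0, hjN, rfl, hjoil.2⟩
  have hfin : (pvDfsB land (pvN land) (pvM land)
      (land.length * (land.headD []).length * 5 + 5) seeds seeds).toFinset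
      = pvColSet land check (PySem.Set.ofList L) := by
    ext q
    rw [List.mem_toFinset, hresmem q]
    exact hchar q
  rw [← List.toFinset_card_of_nodup hresnd, hfin]

-- ===== VERDICT (by name: the statement is the Claim_ definition above) =====
theorem solution_spec : Claim_equal_solution := by
  intro land _ hpre
  unfold Spec_solution
  have hA : solution land = (PySem.List.pyRange 0 (pvM land) 1).foldl (fun answer i =>
      max answer ((((PySem.List.pyRange 0 (pvN land) 1).foldl (fun tmp j =>
        if pvIdx2 (pvScanSt land).1 j i ≠ 0 then
          PySem.Set.add tmp (pvIdx2 (pvScanSt land).1 j i) else tmp)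
        PySem.Set.empty).map (fun t => (pvScanSt land).2.1.getD t 0)).sum)) 0 := rfl
  have hB : solution_alt land = (PySem.List.pyRange 0 (pvM land) 1).foldl (fun best c =>
      max best ((pvDfsB land (pvN land) (pvM land)
        (land.length * (land.headD []).length * 5 + 5)
        (((PySem.List.pyRange 0 (pvN land) 1).filter
          (fun r => pvIdx2 land r c == 1)).map (fun r => (r, c)))
        (PySem.Set.ofList (((PySem.List.pyRange 0 (pvN land) 1).filter
          (fun r => pvIdx2 land r c == 1)).map (fun r => (r, c))))).length : Int)) 0 := rfl
  rw [hA, hB]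
  apply PySem.List.foldl_congr_mem
  intro acc x hx
  obtain ⟨hx0, hxM⟩ := PySem.List.mem_pyRange_one.mp hx
  exact congrArg (max acc) (pv_col_eq land hpre x hx0 hxM)
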